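-- pv_equiv track=rewrite | github.com/JIKMAN/coding-test | python/20ln_4.py | check_nick
-- ===== SOURCE A (Python) =====
-- from collections import defaultdict
--
-- def check_nick(e1, n2):
--     if e1 == n2:
--         return True
--
--     for n in range(1,3):
--         for i in range(len(e1)-(n-1)):
--             tmp = e1[:i] + e1[i+n:]
--             if tmp == n2:
--                 return True
--     for n in range(1,3):
--         for i in range(len(n2)-(n-1)):
--             tmp = n2[:i] + n2[i+n:]
--             if tmp == e1:
--                 return True
--
--     dic = defaultdict(list)
--     for x in [e1, n2]:
--         for i in range(len(x)):
--             tmp = x[:i] + x[i+1:]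
--             dic[x].append(tmp)
--     for a in dic[e1]:
--         for b in dic[n2]:
--             if a == b:
--                 return True
--     return False
-- ===== SOURCE B (Python) =====
-- def _cpl(x, y):
--     """Length of the longest common prefix of two sequences."""
--     n = 0
--     for cx, cy in zip(x, y):
--         if cx != cy:
--             break
--         n += 1
--     return n
--
--
-- def check_nick(e1, n2):
--     # a is the longer string, b the shorter (or equal)
--     a, b = (n2, e1) if len(e1) < len(n2) else (e1, n2)
--     d = len(a) - len(b)
--     if d > 2:
--         return False
--     p = _cpl(a, b)
--     if d == 0:
--         if a == b:
--             return True
--         s = _cpl(a[::-1], b[::-1])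
--         L = len(a)
--         # one deletion from each: skip e1's or n2's first mismatching char
--         return a[p + 1:L - s] == b[p:L - 1 - s] or b[p + 1:L - s] == a[p:L - 1 - s]
--     # deleting a contiguous block of d chars from a yields b
--     s = _cpl(a[::-1], b[::-1])
--     return len(b) <= p + s
-- ===== Notes on version B (the rewrite author's own statement) =====
-- stated objective: faster
-- what changed: B replaces A's brute-force enumeration of deletion results (building every 1- and 2-character-deleted copy of each string and, for the equal-length case, comparing all pairs of single-deletion copies) by a single common-prefix/common-suffix scan: a length-d block deletion exists iff prefix+suffix cover the shorter string, and a one-deletion-each match is decided by two middle-slice comparisons around the first and last mismatch.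
import Mathlib
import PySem

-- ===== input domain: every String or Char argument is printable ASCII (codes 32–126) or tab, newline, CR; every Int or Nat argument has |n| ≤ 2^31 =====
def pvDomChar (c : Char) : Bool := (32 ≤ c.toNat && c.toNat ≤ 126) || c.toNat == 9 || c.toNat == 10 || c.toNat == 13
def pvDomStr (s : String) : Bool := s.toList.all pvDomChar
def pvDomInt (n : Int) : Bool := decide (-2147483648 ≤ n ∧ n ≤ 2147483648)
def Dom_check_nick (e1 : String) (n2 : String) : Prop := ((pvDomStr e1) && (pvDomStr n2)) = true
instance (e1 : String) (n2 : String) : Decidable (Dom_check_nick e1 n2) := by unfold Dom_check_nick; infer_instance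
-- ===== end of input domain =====

-- B replaces A's brute-force enumeration of all deletions (quadratically many candidate
-- strings, each compared in linear time) by an O(n) common-prefix/common-suffix scan.


-- ===== PORT A =====
-- dic[x] in A collects every single-character deletion of x (slices are nonnegative, so
-- x[:i] / x[i+1:] are exactly List.take / List.drop)
def pvDel1 (x : List Char) : List (List Char) :=
  (List.range x.length).map (fun i => x.take i ++ x.drop (i + 1))

-- literal port of A: range(1,3) is the two-element loop [1,2]; each inner loop with an
-- early `return True` is a short-circuit `any`; Python's len(x)-(n-1) is never negative
-- for n=2 exactly when the Nat subtraction is nonzero, and range of a nonpositive bound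
-- and List.range 0 are both empty.
def check_nick (e1 : String) (n2 : String) : Bool :=
  let a := e1.toList
  let b := n2.toList
  if a = b then true
  else if ([1, 2] : List Nat).any (fun n =>
      (List.range (a.length - (n - 1))).any (fun i => a.take i ++ a.drop (i + n) == b)) then true
  else if ([1, 2] : List Nat).any (fun n =>
      (List.range (b.length - (n - 1))).any (fun i => b.take i ++ b.drop (i + n) == a)) then true
  else (pvDel1 a).any (fun x => (pvDel1 b).any (fun y => x == y))

-- ===== PORT B =====
-- _cpl of Source B: length of the longest common prefix
def pvCpl : List Char → List Char → Nat
  | x :: xs, y :: ys => if x = y then pvCpl xs ys + 1 else 0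
  | _, _ => 0

-- Source B's slice comparison a[p+1:L-s] == b[p:L-1-s] (all bounds nonnegative in use)
def pvMid (a b : List Char) (p s : Nat) : Bool :=
  (a.drop (p + 1)).take (a.length - s - (p + 1)) == (b.drop p).take (b.length - 1 - s - p)

def check_nick_alt (e1 : String) (n2 : String) : Bool :=
  let ab := if e1.toList.length < n2.toList.length then (n2.toList, e1.toList)
            else (e1.toList, n2.toList)
  let a := ab.1
  let b := ab.2
  if 2 < a.length - b.length then false
  else
    let p := pvCpl a b
    if a.length - b.length = 0 then
      if a = b then true
      else
        let s := pvCpl a.reverse b.reverse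
        pvMid a b p s || pvMid b a p s
    else
      let s := pvCpl a.reverse b.reverse
      decide (b.length ≤ p + s)

-- ===== PRECONDITION & SPEC =====
def Spec_check_nick (e1 : String) (n2 : String) (out : Bool) : Prop := out = check_nick_alt e1 n2
instance (e1 : String) (n2 : String) (out : Bool) : Decidable (Spec_check_nick e1 n2 out) := by unfold Spec_check_nick; infer_instance

-- ===== CLAIM (what is proved, stated in full; the proofs are below) =====
def Claim_equal_check_nick : Prop := ∀ (e1 : String) (n2 : String), Dom_check_nick e1 n2 → Spec_check_nick e1 n2 (check_nick e1 n2)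

-- ===== LEMMAS AND PROOFS =====

-- A returns True via one of: equality, a contiguous block deletion (length 1 or 2) on
-- either side, or one single-character deletion on each side.
def BlockEq (x y : List Char) (n : Nat) : Prop :=
  ∃ i, i < x.length - (n - 1) ∧ x.take i ++ x.drop (i + n) = y

def PairEq (x y : List Char) : Prop :=
  ∃ i, i < x.length ∧ ∃ j, j < y.length ∧
    x.take i ++ x.drop (i + 1) = y.take j ++ y.drop (j + 1)

def CondD (x y : List Char) : Prop :=
  x = y ∨ BlockEq x y 1 ∨ BlockEq x y 2 ∨ BlockEq y x 1 ∨ BlockEq y x 2 ∨ PairEq x y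

-- segment equality, pointwise
lemma seg_iff (x y : List Char) (dx dy t : Nat) :
    ((x.drop dx).take t = (y.drop dy).take t) ↔ ∀ k, k < t → x[dx + k]? = y[dy + k]? := by
  constructor
  · intro h k hk
    have := congrArg (fun l => l[k]?) h
    simpa [List.getElem?_drop, hk] using this
  · intro h
    apply List.ext_getElem?
    intro i
    by_cases hi : i < t
    · simp [List.getElem?_drop, hi, h i hi]
    · simp [hi]

lemma take_eq_iff (x y : List Char) (t : Nat) :
    (x.take t = y.take t) ↔ ∀ k, k < t → x[k]? = y[k]? := by
  simpa using seg_iff x y 0 0 t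

lemma drop_eq_iff (x y : List Char) (dx dy : Nat) (h : x.length - dx = y.length - dy) :
    (x.drop dx = y.drop dy) ↔ ∀ k, x[dx + k]? = y[dy + k]? := by
  have hx : (x.drop dx).take (x.length - dx) = x.drop dx :=
    List.take_of_length_le (by simp)
  have hy : (y.drop dy).take (y.length - dy) = y.drop dy :=
    List.take_of_length_le (by simp)
  constructor
  · intro hEq k
    by_cases hk : k < x.length - dx
    · exact (seg_iff x y dx dy (x.length - dx)).1 (by rw [hx, h, hy, hEq]) k hk
    · have h1 : x[dx + k]? = none := List.getElem?_eq_none (by omega)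
      have h2 : y[dy + k]? = none := List.getElem?_eq_none (by omega)
      rw [h1, h2]
  · intro hAll
    rw [← hx, h, ← hy]
    exact (seg_iff x y dx dy (y.length - dy)).2 (fun k _ => hAll k)

lemma pvCpl_le_left : ∀ (x y : List Char), pvCpl x y ≤ x.length
  | [], _ => by simp [pvCpl]
  | _ :: _, [] => by simp [pvCpl]
  | cx :: xs, cy :: ys => by
      by_cases h : cx = cy
      · simpa [pvCpl, h] using pvCpl_le_left xs ys
      · simp [pvCpl, h]

lemma pvCpl_le_right : ∀ (x y : List Char), pvCpl x y ≤ y.length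
  | [], _ => by simp [pvCpl]
  | _ :: _, [] => by simp [pvCpl]
  | cx :: xs, cy :: ys => by
      by_cases h : cx = cy
      · simpa [pvCpl, h] using pvCpl_le_right xs ys
      · simp [pvCpl, h]

lemma pvCpl_get : ∀ (x y : List Char) (k : Nat), k < pvCpl x y → x[k]? = y[k]?
  | [], _, k => by simp [pvCpl]
  | _ :: _, [], k => by simp [pvCpl]
  | cx :: xs, cy :: ys, k => by
      by_cases h : cx = cy
      · cases k with
        | zero => intro _; simp [h]
        | succ k' =>
            intro hk
            have hk' : k' < pvCpl xs ys := by simp [pvCpl, h] at hk; omega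
            simpa using pvCpl_get xs ys k' hk'
      · simp [pvCpl, h]

lemma pvCpl_ge : ∀ (x y : List Char) (i : Nat), i ≤ x.length → i ≤ y.length →
    (∀ k, k < i → x[k]? = y[k]?) → i ≤ pvCpl x y
  | _, _, 0 => by intro _ _ _; omega
  | [], _, (i + 1) => by intro hx _ _; simp at hx
  | _ :: _, [], (i + 1) => by intro _ hy _; simp at hy
  | cx :: xs, cy :: ys, (i + 1) => by
      intro hx hy hAll
      have h0 : cx = cy := by have := hAll 0 (by omega); simpa using this
      have hrec := pvCpl_ge xs ys i (by simpa using hx) (by simpa using hy)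
        (fun k hk => by have := hAll (k + 1) (by omega); simpa using this)
      simp [pvCpl, h0]; omega

lemma pvCpl_comm : ∀ (x y : List Char), pvCpl x y = pvCpl y x
  | [], [] => rfl
  | [], _ :: _ => rfl
  | _ :: _, [] => rfl
  | cx :: xs, cy :: ys => by
      by_cases h : cx = cy
      · subst h; simp [pvCpl, pvCpl_comm xs ys]
      · simp [pvCpl, h, show ¬cy = cx from fun hh => h hh.symm]

-- common suffix, pointwise from the right
lemma suf_get (x y : List Char) (k : Nat) (hk : k < pvCpl x.reverse y.reverse) :
    x[x.length - 1 - k]? = y[y.length - 1 - k]? := by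
  have hkx : k < x.length := by
    have := pvCpl_le_left x.reverse y.reverse; simp at this; omega
  have hky : k < y.length := by
    have := pvCpl_le_right x.reverse y.reverse; simp at this; omega
  have h := pvCpl_get x.reverse y.reverse k hk
  rwa [List.getElem?_reverse (by simpa using hkx), List.getElem?_reverse (by simpa using hky)] at h

lemma suf_ge (x y : List Char) (i : Nat) (hix : i ≤ x.length) (hiy : i ≤ y.length)
    (hAll : ∀ k, k < i → x[x.length - 1 - k]? = y[y.length - 1 - k]?) :
    i ≤ pvCpl x.reverse y.reverse := by
  apply pvCpl_ge x.reverse y.reverse i (by simpa using hix) (by simpa using hiy)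
  intro k hk
  rw [List.getElem?_reverse (by omega), List.getElem?_reverse (by omega)]
  exact hAll k hk

lemma prefix_eq_iff (x y : List Char) (t : Nat) (htx : t ≤ x.length) (hty : t ≤ y.length) :
    (x.take t = y.take t) ↔ t ≤ pvCpl x y := by
  rw [take_eq_iff]
  constructor
  · intro h; exact pvCpl_ge x y t htx hty h
  · intro h k hk; exact pvCpl_get x y k (by omega)

lemma suffix_eq_iff (x y : List Char) (dx dy : Nat) (hdx : dx ≤ x.length) (hdy : dy ≤ y.length)
    (ht : x.length - dx = y.length - dy) :
    (x.drop dx = y.drop dy) ↔ x.length - dx ≤ pvCpl x.reverse y.reverse := by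
  rw [drop_eq_iff x y dx dy ht]
  constructor
  · intro hAll
    apply suf_ge x y (x.length - dx) (by omega) (by omega)
    intro k hk
    have h := hAll (x.length - dx - 1 - k)
    have e1 : dx + (x.length - dx - 1 - k) = x.length - 1 - k := by omega
    have e2 : dy + (x.length - dx - 1 - k) = y.length - 1 - k := by omega
    rwa [e1, e2] at h
  · intro hs k
    by_cases hk : k < x.length - dx
    · have h := suf_get x y (x.length - dx - 1 - k) (by omega)
      have e1 : x.length - 1 - (x.length - dx - 1 - k) = dx + k := by omega
      have e2 : y.length - 1 - (x.length - dx - 1 - k) = dy + k := by omega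
      rwa [e1, e2] at h
    · have h1 : x[dx + k]? = none := List.getElem?_eq_none (by omega)
      have h2 : y[dy + k]? = none := List.getElem?_eq_none (by omega)
      rw [h1, h2]

-- deleting a contiguous block of length n (n = 1 or 2) from x yields y
-- iff the lengths fit and common prefix + common suffix cover y
lemma block_iff (x y : List Char) (n : Nat) (hn : 1 ≤ n) :
    BlockEq x y n ↔
      x.length = y.length + n ∧ y.length ≤ pvCpl x y + pvCpl x.reverse y.reverse := by
  constructor
  · rintro ⟨i, hi, heq⟩
    have hin : i + n ≤ x.length := by omega
    have hlen : x.length = y.length + n := by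
      have h := congrArg List.length heq
      simp [List.length_take, List.length_drop] at h
      omega
    refine ⟨hlen, ?_⟩
    rw [← List.take_append_drop i y] at heq
    obtain ⟨h1, h2⟩ := List.append_inj heq (by simp [List.length_take]; omega)
    have hp : i ≤ pvCpl x y := (prefix_eq_iff x y i (by omega) (by omega)).1 h1
    have hs : x.length - (i + n) ≤ pvCpl x.reverse y.reverse :=
      (suffix_eq_iff x y (i + n) i (by omega) (by omega) (by omega)).1 h2
    omega
  · rintro ⟨hlen, hps⟩
    have hp' := pvCpl_le_right x y
    refine ⟨y.length - pvCpl x.reverse y.reverse, by omega, ?_⟩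
    set i := y.length - pvCpl x.reverse y.reverse with hidef
    have hip : i ≤ pvCpl x y := by omega
    have h1 : x.take i = y.take i := (prefix_eq_iff x y i (by omega) (by omega)).2 hip
    have h2 : x.drop (i + n) = y.drop i := by
      apply (suffix_eq_iff x y (i + n) i (by omega) (by omega) (by omega)).2
      omega
    rw [h1, h2, List.take_append_drop]

-- element m of x with position i deleted
lemma del_get (x : List Char) (i m : Nat) (hi : i ≤ x.length) :
    (x.take i ++ x.drop (i + 1))[m]? = if m < i then x[m]? else x[m + 1]? := by
  by_cases hm : m < i
  · rw [List.getElem?_append_left (by simp [List.length_take]; omega)]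
    simp [hm]
  · rw [List.getElem?_append_right (by simp [List.length_take]; omega)]
    rw [List.length_take, min_eq_left hi, List.getElem?_drop]
    have : i + 1 + (m - i) = m + 1 := by omega
    rw [this]
    simp [hm]

lemma del_eq_iff (x y : List Char) (i j : Nat) (hL : x.length = y.length)
    (hi : i < x.length) (hj : j < y.length) (hij : i ≤ j) :
    (x.take i ++ x.drop (i + 1) = y.take j ++ y.drop (j + 1)) ↔
      ((∀ k, k < i → x[k]? = y[k]?) ∧ (∀ k, i ≤ k → k < j → x[k + 1]? = y[k]?) ∧
       (∀ k, j < k → x[k]? = y[k]?)) := by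
  constructor
  · intro h
    have hm : ∀ m, (if m < i then x[m]? else x[m + 1]?) = (if m < j then y[m]? else y[m + 1]?) := by
      intro m
      rw [← del_get x i m (by omega), ← del_get y j m (by omega), h]
    refine ⟨?_, ?_, ?_⟩
    · intro k hk
      have := hm k; simp [hk, show k < j by omega] at this; exact this
    · intro k hk1 hk2
      have := hm k; simp [show ¬ k < i by omega, hk2] at this; exact this
    · intro k hk
      rcases Nat.exists_eq_add_of_le (show j + 1 ≤ k by omega) with ⟨m', rfl⟩
      have := hm (j + m')
      simp [show ¬ j + m' < i by omega, show ¬ j + m' < j by omega] at this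
      have e : j + 1 + m' = j + m' + 1 := by omega
      rw [e]; exact this
  · rintro ⟨h1, h2, h3⟩
    apply List.ext_getElem?
    intro m
    rw [del_get x i m (by omega), del_get y j m (by omega)]
    split_ifs with c1 c2 c2
    · exact h1 m c1
    · omega
    · exact h2 m (by omega) c2
    · exact h3 (m + 1) (by omega)

lemma pairEq_symm (x y : List Char) : PairEq x y ↔ PairEq y x := by
  constructor <;> (rintro ⟨i, hi, j, hj, h⟩; exact ⟨j, hj, i, hi, h.symm⟩)

lemma pairEq_len (x y : List Char) : PairEq x y → x.length = y.length := by
  rintro ⟨i, hi, j, hj, h⟩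
  have := congrArg List.length h
  simp [List.length_take, List.length_drop] at this
  omega

lemma ps_lt (x y : List Char) (hL : x.length = y.length) (hne : x ≠ y) :
    pvCpl x y + pvCpl x.reverse y.reverse < x.length := by
  by_contra hcon
  have hge : x.length ≤ pvCpl x y + pvCpl x.reverse y.reverse := Nat.le_of_not_lt hcon
  apply hne
  have hp := pvCpl_le_left x y
  set p := pvCpl x y with hpdef
  have h1 : x.take p = y.take p := (prefix_eq_iff x y p hp (by omega)).2 le_rfl
  have h2 : x.drop p = y.drop p := by
    apply (suffix_eq_iff x y p p hp (by omega) (by omega)).2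
    omega
  calc x = x.take p ++ x.drop p := (List.take_append_drop p x).symm
    _ = y.take p ++ y.drop p := by rw [h1, h2]
    _ = y := List.take_append_drop p y

-- the middle-slice test of Source B, as a pointwise statement
lemma pvMid_iff (x y : List Char) (hL : x.length = y.length)
    (hps : pvCpl x y + pvCpl x.reverse y.reverse < x.length) :
    (pvMid x y (pvCpl x y) (pvCpl x.reverse y.reverse) = true) ↔
      ∀ k, k < x.length - (pvCpl x y + pvCpl x.reverse y.reverse + 1) →
        x[pvCpl x y + 1 + k]? = y[pvCpl x y + k]? := by
  set p := pvCpl x y with hpdef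
  set s := pvCpl x.reverse y.reverse with hsdef
  have e1 : x.length - s - (p + 1) = x.length - (p + s + 1) := by omega
  have e2 : y.length - 1 - s - p = x.length - (p + s + 1) := by omega
  rw [pvMid, beq_iff_eq, e1, e2, seg_iff]

-- one single-character deletion on each side (equal lengths, x ≠ y) holds iff one of
-- Source B's two middle-slice comparisons holds
lemma mid_to_pair (x y : List Char) (hL : x.length = y.length)
    (hps : pvCpl x y + pvCpl x.reverse y.reverse < x.length)
    (h : pvMid x y (pvCpl x y) (pvCpl x.reverse y.reverse) = true) : PairEq x y := by
  set p := pvCpl x y with hpdef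
  set s := pvCpl x.reverse y.reverse with hsdef
  have hmid := (pvMid_iff x y hL hps).1 h
  refine ⟨p, by omega, x.length - 1 - s, by omega, ?_⟩
  apply (del_eq_iff x y p (x.length - 1 - s) hL (by omega) (by omega) (by omega)).2
  refine ⟨fun k hk => pvCpl_get x y k (by omega), ?_, ?_⟩
  · intro k hk1 hk2
    have h := hmid (k - p) (by omega)
    have e1 : p + 1 + (k - p) = k + 1 := by omega
    have e2 : p + (k - p) = k := by omega
    rwa [e1, e2] at h
  · intro k hk
    by_cases hkL : k < x.length
    · have h := suf_get x y (x.length - 1 - k) (by omega)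
      have e1 : x.length - 1 - (x.length - 1 - k) = k := by omega
      have e2 : y.length - 1 - (x.length - 1 - k) = k := by omega
      rwa [e1, e2] at h
    · rw [List.getElem?_eq_none (by omega), List.getElem?_eq_none (by omega)]

lemma pair_to_mid (x y : List Char) (hL : x.length = y.length)
    (hps : pvCpl x y + pvCpl x.reverse y.reverse < x.length)
    (i j : Nat) (hi : i < x.length) (hj : j < y.length) (hij : i ≤ j)
    (heq : x.take i ++ x.drop (i + 1) = y.take j ++ y.drop (j + 1)) :
    pvMid x y (pvCpl x y) (pvCpl x.reverse y.reverse) = true := by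
  set p := pvCpl x y with hpdef
  set s := pvCpl x.reverse y.reverse with hsdef
  obtain ⟨h1, h2, h3⟩ := (del_eq_iff x y i j hL hi hj hij).1 heq
  have hip : i ≤ p := pvCpl_ge x y i (by omega) (by omega) h1
  have hjs : x.length - 1 - j ≤ s := by
    apply suf_ge x y (x.length - 1 - j) (by omega) (by omega)
    intro k hk
    have e2 : y.length - 1 - k = x.length - 1 - k := by omega
    rw [e2]
    exact h3 (x.length - 1 - k) (by omega)
  apply (pvMid_iff x y hL hps).2
  intro k hk
  have h := h2 (p + k) (by omega) (by omega)
  have e : p + k + 1 = p + 1 + k := by omega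
  rwa [e] at h

lemma pair_iff (x y : List Char) (hL : x.length = y.length) (hne : x ≠ y) :
    ((pvMid x y (pvCpl x y) (pvCpl x.reverse y.reverse) ||
      pvMid y x (pvCpl x y) (pvCpl x.reverse y.reverse)) = true) ↔ PairEq x y := by
  have hps : pvCpl x y + pvCpl x.reverse y.reverse < x.length := ps_lt x y hL hne
  have hcomm : pvCpl y x = pvCpl x y := (pvCpl_comm x y).symm
  have hcommr : pvCpl y.reverse x.reverse = pvCpl x.reverse y.reverse :=
    (pvCpl_comm x.reverse y.reverse).symm
  have hps' : pvCpl y x + pvCpl y.reverse x.reverse < y.length := by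
    rw [hcomm, hcommr]; omega
  rw [Bool.or_eq_true]
  constructor
  · rintro (h | h)
    · exact mid_to_pair x y hL hps h
    · rw [← hcomm, ← hcommr] at h
      exact (pairEq_symm y x).1 (mid_to_pair y x hL.symm hps' h)
  · rintro ⟨i, hi, j, hj, heq⟩
    by_cases hij : i ≤ j
    · exact Or.inl (pair_to_mid x y hL hps i j hi hj hij heq)
    · right
      rw [← hcomm, ← hcommr]
      exact pair_to_mid y x hL.symm hps' j i hj hi (by omega) heq.symm

lemma blockA_iff (x y : List Char) (n : Nat) :
    (((List.range (x.length - (n - 1))).any (fun i => x.take i ++ x.drop (i + n) == y)) = true)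
      ↔ BlockEq x y n := by
  simp [List.any_eq_true, List.mem_range, BlockEq]

lemma pairA_iff (x y : List Char) :
    (((pvDel1 x).any (fun u => (pvDel1 y).any (fun v => u == v))) = true) ↔ PairEq x y := by
  simp only [pvDel1, List.any_eq_true, List.mem_map, List.mem_range, beq_iff_eq]
  constructor
  · rintro ⟨u, ⟨i, hi, rfl⟩, v, ⟨j, hj, rfl⟩, h⟩
    exact ⟨i, hi, j, hj, h⟩
  · rintro ⟨i, hi, j, hj, h⟩
    exact ⟨_, ⟨i, hi, rfl⟩, _, ⟨j, hj, rfl⟩, h⟩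

lemma checkA_iff (e1 n2 : String) :
    check_nick e1 n2 = true ↔ CondD e1.toList n2.toList := by
  simp only [check_nick, List.any_cons, List.any_nil, Bool.or_false]
  by_cases hab : e1.toList = n2.toList
  · simp [hab, CondD]
  · rw [if_neg hab]
    split_ifs with h1 h2
    · rw [Bool.or_eq_true, blockA_iff, blockA_iff] at h1
      constructor
      · intro _
        rcases h1 with h | h
        · exact Or.inr (Or.inl h)
        · exact Or.inr (Or.inr (Or.inl h))
      · intro _; rfl
    · rw [Bool.or_eq_true, blockA_iff, blockA_iff] at h2
      constructor
      · intro _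
        rcases h2 with h | h
        · exact Or.inr (Or.inr (Or.inr (Or.inl h)))
        · exact Or.inr (Or.inr (Or.inr (Or.inr (Or.inl h))))
      · intro _; rfl
    · rw [Bool.or_eq_true, blockA_iff, blockA_iff] at h1 h2
      rw [pairA_iff]
      constructor
      · intro h; exact Or.inr (Or.inr (Or.inr (Or.inr (Or.inr h))))
      · rintro (h | h | h | h | h | h)
        · exact absurd h hab
        · exact absurd (Or.inl h) h1
        · exact absurd (Or.inr h) h1
        · exact absurd (Or.inl h) h2
        · exact absurd (Or.inr h) h2
        · exact h

lemma blockEq_len (x y : List Char) (n : Nat) (hn : 1 ≤ n) :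
    BlockEq x y n → x.length = y.length + n :=
  fun h => ((block_iff x y n hn).1 h).1

-- B's core decision, for b the not-longer string
lemma core_iff (a b : List Char) (hba : b.length ≤ a.length) :
    ((if 2 < a.length - b.length then false
      else if a.length - b.length = 0 then
        if a = b then true
        else pvMid a b (pvCpl a b) (pvCpl a.reverse b.reverse) ||
             pvMid b a (pvCpl a b) (pvCpl a.reverse b.reverse)
      else decide (b.length ≤ pvCpl a b + pvCpl a.reverse b.reverse)) = true)
      ↔ CondD a b := by
  split_ifs with hd h0 hab
  · -- length gap > 2: nothing can hold
    simp only [false_iff, CondD]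
    rintro (h | h | h | h | h | h)
    · subst h; omega
    · have := blockEq_len a b 1 (by omega) h; omega
    · have := blockEq_len a b 2 (by omega) h; omega
    · have := blockEq_len b a 1 (by omega) h; omega
    · have := blockEq_len b a 2 (by omega) h; omega
    · have := pairEq_len a b h; omega
  · simp [CondD, hab]
  · -- equal lengths, a ≠ b: only the pair condition can hold
    have hL : a.length = b.length := by omega
    rw [pair_iff a b hL hab]
    simp only [CondD]
    constructor
    · intro h; exact Or.inr (Or.inr (Or.inr (Or.inr (Or.inr h))))
    · rintro (h | h | h | h | h | h)
      · exact absurd h hab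
      · have := blockEq_len a b 1 (by omega) h; omega
      · have := blockEq_len a b 2 (by omega) h; omega
      · have := blockEq_len b a 1 (by omega) h; omega
      · have := blockEq_len b a 2 (by omega) h; omega
      · exact h
  · -- length gap is 1 or 2: only a block deletion from a can hold
    have hd12 : a.length = b.length + 1 ∨ a.length = b.length + 2 := by omega
    rw [decide_eq_true_iff]
    simp only [CondD]
    constructor
    · intro h
      rcases hd12 with hL | hL
      · exact Or.inr (Or.inl ((block_iff a b 1 (by omega)).2 ⟨hL, h⟩))
      · exact Or.inr (Or.inr (Or.inl ((block_iff a b 2 (by omega)).2 ⟨hL, h⟩)))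
    · rintro (h | h | h | h | h | h)
      · subst h; omega
      · exact ((block_iff a b 1 (by omega)).1 h).2
      · exact ((block_iff a b 2 (by omega)).1 h).2
      · have := blockEq_len b a 1 (by omega) h; omega
      · have := blockEq_len b a 2 (by omega) h; omega
      · have := pairEq_len a b h; omega

lemma condD_symm (x y : List Char) : CondD x y ↔ CondD y x := by
  simp only [CondD, pairEq_symm x y, eq_comm (a := x) (b := y)]
  tauto

lemma main_eq (e1 n2 : String) : check_nick e1 n2 = check_nick_alt e1 n2 := by
  rw [Bool.eq_iff_iff, checkA_iff]
  by_cases hlt : e1.toList.length < n2.toList.length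
  · have hB : check_nick_alt e1 n2 =
        (if 2 < n2.toList.length - e1.toList.length then false
         else if n2.toList.length - e1.toList.length = 0 then
           if n2.toList = e1.toList then true
           else pvMid n2.toList e1.toList (pvCpl n2.toList e1.toList)
                  (pvCpl n2.toList.reverse e1.toList.reverse) ||
                pvMid e1.toList n2.toList (pvCpl n2.toList e1.toList)
                  (pvCpl n2.toList.reverse e1.toList.reverse)
         else decide (e1.toList.length ≤ pvCpl n2.toList e1.toList +
                pvCpl n2.toList.reverse e1.toList.reverse)) := by
      simp only [check_nick_alt, if_pos hlt]
    rw [hB, core_iff n2.toList e1.toList (by omega), condD_symm]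
  · have hB : check_nick_alt e1 n2 =
        (if 2 < e1.toList.length - n2.toList.length then false
         else if e1.toList.length - n2.toList.length = 0 then
           if e1.toList = n2.toList then true
           else pvMid e1.toList n2.toList (pvCpl e1.toList n2.toList)
                  (pvCpl e1.toList.reverse n2.toList.reverse) ||
                pvMid n2.toList e1.toList (pvCpl e1.toList n2.toList)
                  (pvCpl e1.toList.reverse n2.toList.reverse)
         else decide (n2.toList.length ≤ pvCpl e1.toList n2.toList +
                pvCpl e1.toList.reverse n2.toList.reverse)) := by
      simp only [check_nick_alt, if_neg hlt]
    rw [hB, core_iff e1.toList n2.toList (by omega)]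

-- ===== VERDICT (by name: the statement is the Claim_ definition above) =====
theorem check_nick_spec : Claim_equal_check_nick := by
  intro e1 n2 _
  unfold Spec_check_nick
  exact main_eq e1 n2
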